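-- pv_equiv track=rewrite | github.com/nixternal/CodingChallenges | EverybodyCodes/2025-The_Song_of_Ducks_and_Dragons/08.py | count_chord_intersections
-- ===== SOURCE A (Python) =====
-- def count_chord_intersections(chords: list[tuple[int, int]], max_nail: int) -> int:
--     """
--     Count intersections between chords using a sweep line algorithm with Fenwick tree.
--     Two chords (a1,b1) and (a2,b2) intersect iff a1 < a2 < b1 < b2.
--
--     Time: O(n log n), Space: O(max_nail)
--     """
--     if len(chords) <= 1:
--         return 0
--
--     chords.sort()
--
--     # Fenwick tree (Binary Indexed Tree) for efficient prefix sums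
--     tree = [0] * (max_nail + 1)
--
--     def update(idx: int) -> None:
--         """Add 1 to position idx in the Fenwick tree."""
--         while idx <= max_nail:
--             tree[idx] += 1
--             idx += idx & -idx
--
--     def query(idx: int) -> int:
--         """Get sum of elements from 1 to idx."""
--         total = 0
--         while idx > 0:
--             total += tree[idx]
--             idx -= idx & -idx
--         return total
--
--     intersections = 0
--     i = 0
--
--     # Process chords grouped by left endpoint
--     while i < len(chords):
--         left_endpoint = chords[i][0]
--         batch = []
--
--         # Collect all chords with same left endpoint
--         while i < len(chords) and chords[i][0] == left_endpoint:
--             a, b = chords[i]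
--             # Count chords that intersect: those ending between a and b
--             intersections += query(b - 1) - query(a)
--             batch.append(b)
--             i += 1
--
--         # Add all right endpoints from this batch to the tree
--         for b in batch:
--             update(b)
--
--     return intersections
-- ===== SOURCE B (Python) =====
-- def count_chord_intersections(chords: list[tuple[int, int]], max_nail: int) -> int:
--     """
--     Count interleaving chord pairs by a direct pairwise scan of the sorted list
--     (no Fenwick tree). Two chords (a1,b1), (a2,b2) intersect iff a1 < a2 < b1 < b2.
--     Like A, sorts `chords` in place.
--     """
--     if len(chords) <= 1:
--         return 0
--
--     chords.sort()
--
--     total = 0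
--     for i in range(len(chords)):
--         a, b = chords[i]
--         for j in range(i + 1, len(chords)):
--             c, d = chords[j]
--             if a < c < b < d:
--                 total += 1
--     return total
-- ===== Notes on version B (the rewrite author's own statement) =====
-- stated objective: simpler
-- what changed: Replaces the Fenwick-tree sweep (batched prefix-sum queries and bit-indexed updates) with a direct double loop over the sorted chord list that counts pairs i<j with a_i < a_j < b_i < b_j.
-- outside the precondition, e.g. on count_chord_intersections([(1, 3), (3, 2)], 3): A returns -1, B returns 0; on count_chord_intersections([(1, 3), (2, 1)], 3): A returns 0, B returns 0
import Mathlib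
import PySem

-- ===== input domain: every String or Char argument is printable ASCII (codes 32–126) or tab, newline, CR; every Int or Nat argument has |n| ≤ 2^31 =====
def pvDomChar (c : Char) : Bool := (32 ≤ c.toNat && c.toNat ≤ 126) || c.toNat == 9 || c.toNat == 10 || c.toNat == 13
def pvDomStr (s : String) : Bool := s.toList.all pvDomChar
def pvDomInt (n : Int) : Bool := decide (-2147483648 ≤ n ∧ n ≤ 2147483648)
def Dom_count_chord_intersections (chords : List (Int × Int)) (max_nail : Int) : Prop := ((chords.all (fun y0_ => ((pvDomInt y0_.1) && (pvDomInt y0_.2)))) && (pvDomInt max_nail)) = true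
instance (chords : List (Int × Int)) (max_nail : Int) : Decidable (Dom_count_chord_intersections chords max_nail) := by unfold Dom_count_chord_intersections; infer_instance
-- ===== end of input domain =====

-- B replaces A's Fenwick-tree sweep with a direct pairwise scan of the sorted list (simpler, not
-- faster); both Pythons sort `chords` in place — the equivalence proved here is about the return value.

-- ===== PORT A =====
-- Fenwick `update`: `while idx <= max_nail: tree[idx] += 1; idx += idx & -idx`, as a fuel loop
-- (the fuel only makes the loop total: for 1 ≤ idx it never runs out; Python diverges for idx ≤ 0,
-- which Pre_ excludes).
def fenUpdateGo (N : Int) : Nat → List Int → Int → List Int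
  | 0, tree, _ => tree
  | fuel+1, tree, idx =>
    if idx ≤ N then
      fenUpdateGo N fuel (tree.set idx.toNat (tree.getD idx.toNat 0 + 1))
        (idx + PySem.Int.band idx (-idx))
    else tree

def fenUpdate (N : Int) (tree : List Int) (idx : Int) : List Int :=
  fenUpdateGo N (N + 1 - idx).toNat tree idx

-- Fenwick `query`: `while idx > 0: total += tree[idx]; idx -= idx & -idx` (same fuel remark; all
-- accesses are in range under Pre_, so `tree[idx]` is ported as getD).
def fenQueryGo (tree : List Int) : Nat → Int → Int
  | 0, _ => 0
  | fuel+1, idx =>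
    if 0 < idx then tree.getD idx.toNat 0 + fenQueryGo tree fuel (idx - PySem.Int.band idx (-idx))
    else 0

def fenQuery (tree : List Int) (idx : Int) : Int := fenQueryGo tree idx.toNat idx

-- the outer `while i < len(chords)` loop: one iteration = one batch of equal left endpoints
-- (inner while = takeWhile/dropWhile), queries over the batch against the unchanged tree, then the
-- `for b in batch: update(b)` loop.
def sweep (N : Int) : List (Int × Int) → List Int → Int → Int
  | [], _, acc => acc
  | (a, b) :: rest, tree, acc =>
      let batch := (a, b) :: rest.takeWhile (fun p => p.1 == a)
      let rest' := rest.dropWhile (fun p => p.1 == a)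
      let acc' := batch.foldl (fun s p => s + (fenQuery tree (p.2 - 1) - fenQuery tree p.1)) acc
      let tree' := batch.foldl (fun t p => fenUpdate N t p.2) tree
      sweep N rest' tree' acc'
  termination_by s => s.length
  decreasing_by
    have := List.length_dropWhile_le (fun p => p.1 == a) rest
    simp only [List.length_cons]
    omega

def count_chord_intersections (chords : List (Int × Int)) (max_nail : Int) : Int :=
  if chords.length ≤ 1 then 0
  else
    sweep max_nail (PySem.List.sorted2 chords Prod.fst Prod.snd)
      (List.replicate (max_nail + 1).toNat 0) 0

-- ===== PORT B =====
-- the nested `for i … for j in range(i+1, …)` loops: outer loop = recursion on the suffix,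
-- inner counting loop = countP over the tail.
def brutePairs : List (Int × Int) → Int
  | [] => 0
  | p :: rest =>
      ((rest.countP (fun q => decide (p.1 < q.1 ∧ q.1 < p.2 ∧ p.2 < q.2)) : Nat) : Int) +
        brutePairs rest

def count_chord_intersections_alt (chords : List (Int × Int)) (max_nail : Int) : Int :=
  if chords.length ≤ 1 then 0
  else brutePairs (PySem.List.sorted2 chords Prod.fst Prod.snd)

-- ===== PRECONDITION & SPEC =====
-- Pre_ is the natural domain: at most one chord (A returns 0 before reading anything), or every
-- chord listed as (smaller, larger) with right endpoint a nail index A's tree can hold. Outside it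
-- A raises IndexError (endpoint beyond the tree) or loops forever (right endpoint ≤ 0), and on
-- inverted chords (b ≤ a) A's prefix-sum subtraction can return negative "counts" (e.g. -1 on
-- [(1,3),(3,2)] where B returns 0).
def Pre_count_chord_intersections (chords : List (Int × Int)) (max_nail : Int) : Prop :=
  chords.length ≤ 1 ∨ ∀ p ∈ chords, p.1 < p.2 ∧ 1 ≤ p.2 ∧ p.2 ≤ max_nail + 1
instance (chords : List (Int × Int)) (max_nail : Int) : Decidable (Pre_count_chord_intersections chords max_nail) := by unfold Pre_count_chord_intersections; infer_instance

def pvWitness_count_chord_intersections : (List (Int × Int)) × Int := ([(1, 3), (2, 4)], 4)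

def Spec_count_chord_intersections (chords : List (Int × Int)) (max_nail : Int) (out : Int) : Prop := out = count_chord_intersections_alt chords max_nail
instance (chords : List (Int × Int)) (max_nail : Int) (out : Int) : Decidable (Spec_count_chord_intersections chords max_nail out) := by unfold Spec_count_chord_intersections; infer_instance

-- ===== CLAIM (what is proved, stated in full; the proofs are below) =====
def Claim_equal_count_chord_intersections : Prop := ∀ (chords : List (Int × Int)) (max_nail : Int), Dom_count_chord_intersections chords max_nail → Pre_count_chord_intersections chords max_nail → Spec_count_chord_intersections chords max_nail (count_chord_intersections chords max_nail)

-- ===== LEMMAS AND PROOFS =====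

-- `idx & -idx` of a positive idx is its lowest set bit; on Nat it is `m - (m &&& (m-1))`.
def lowg (m : Nat) : Nat := m - (m &&& (m - 1))

theorem band_neg_self (m : Nat) (h : 0 < m) :
    PySem.Int.band (m : Int) (-(m : Int)) = ((lowg m : Nat) : Int) := by
  unfold PySem.Int.band lowg
  have h1 : (0 : Int) ≤ (m : Int) := by positivity
  have h2 : ¬ (0 : Int) ≤ -(m : Int) := by omega
  simp only [h1, h2, if_true, if_false, if_pos, if_neg, not_false_iff]
  have h3 : ((m : Int)).toNat = m := by omega
  have h4 : (-(-(m : Int)) - 1).toNat = m - 1 := by omega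
  rw [h3, h4]

theorem land_double_odd (k : Nat) : (2*k+1) &&& (2*k) = 2*k := by
  apply Nat.eq_of_testBit_eq
  intro i
  cases i with
  | zero =>
    simp only [Nat.testBit_and, Nat.testBit_zero, show (2*k) % 2 = 0 from by omega]
    simp
  | succ i =>
    have e1 : (2*k+1)/2 = k := by omega
    have e2 : (2*k)/2 = k := by omega
    rw [Nat.testBit_and, Nat.testBit_succ, e1, Nat.testBit_succ, e2]
    simp

theorem land_double_even (k : Nat) (h : 0 < k) : (2*k) &&& (2*k-1) = 2*(k &&& (k-1)) := by
  have hk : 2*k-1 = 2*(k-1)+1 := by omega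
  apply Nat.eq_of_testBit_eq
  intro i
  cases i with
  | zero =>
    rw [hk]
    simp only [Nat.testBit_and, Nat.testBit_zero, show (2*k) % 2 = 0 from by omega,
      show (2*(k &&& (k-1))) % 2 = 0 from by omega]
    simp
  | succ i =>
    have e1 : (2*k)/2 = k := by omega
    have e2 : (2*(k-1)+1)/2 = k-1 := by omega
    have e3 : (2*(k &&& (k-1)))/2 = k &&& (k-1) := by omega
    rw [hk, Nat.testBit_and, Nat.testBit_succ, e1, Nat.testBit_succ, e2, Nat.testBit_succ, e3,
      Nat.testBit_and]

theorem lowg_odd (k : Nat) : lowg (2*k+1) = 1 := by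
  unfold lowg
  have : (2*k+1) - 1 = 2*k := by omega
  rw [this, land_double_odd]
  omega

theorem lowg_even (k : Nat) (h : 0 < k) : lowg (2*k) = 2 * lowg k := by
  unfold lowg
  rw [land_double_even k h]
  have h1 : k &&& (k-1) ≤ k := Nat.and_le_left
  omega

theorem lowg_le (m : Nat) : lowg m ≤ m := by unfold lowg; omega

theorem lowg_pos : ∀ m : Nat, 0 < m → 0 < lowg m := by
  intro m
  induction m using Nat.strong_induction_on with
  | _ m ih =>
    intro hm
    rcases Nat.even_or_odd m with ⟨k, hk⟩ | ⟨k, hk⟩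
    · have hk' : m = 2*k := by omega
      subst hk'
      rw [lowg_even k (by omega)]
      have := ih k (by omega) (by omega)
      omega
    · have hk' : m = 2*k+1 := by omega
      subst hk'
      rw [lowg_odd]
      omega

theorem lowg_step : ∀ e : Nat, 0 < e → 2 * lowg e ≤ lowg (e + lowg e) := by
  intro e
  induction e using Nat.strong_induction_on with
  | _ e ih =>
    intro he
    rcases Nat.even_or_odd e with ⟨k, hk⟩ | ⟨k, hk⟩
    · have hk' : e = 2*k := by omega
      subst hk'
      have hkpos : 0 < k := by omega
      rw [lowg_even k hkpos]
      have h2 : 2*k + 2*lowg k = 2*(k + lowg k) := by ring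
      rw [h2, lowg_even (k + lowg k) (by have := lowg_pos k hkpos; omega)]
      have := ih k (by omega) hkpos
      omega
    · have hk' : e = 2*k+1 := by omega
      subst hk'
      rw [lowg_odd]
      have h2 : 2*k+1+1 = 2*(k+1) := by omega
      rw [h2, lowg_even (k+1) (by omega)]
      have := lowg_pos (k+1) (by omega)
      omega

theorem lowg_add_small : ∀ e : Nat, 0 < e → ∀ r : Nat, 0 < r → r < lowg e → lowg (e + r) = lowg r := by
  intro e
  induction e using Nat.strong_induction_on with
  | _ e ih =>
    intro he r hr hrl
    rcases Nat.even_or_odd e with ⟨k, hk⟩ | ⟨k, hk⟩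
    · have hk' : e = 2*k := by omega
      subst hk'
      have hkpos : 0 < k := by omega
      rw [lowg_even k hkpos] at hrl
      rcases Nat.even_or_odd r with ⟨s, hs⟩ | ⟨s, hs⟩
      · have hs' : r = 2*s := by omega
        subst hs'
        have hspos : 0 < s := by omega
        have h2 : 2*k + 2*s = 2*(k+s) := by ring
        rw [h2, lowg_even (k+s) (by omega), lowg_even s hspos,
          ih k (by omega) hkpos s hspos (by omega)]
      · have hs' : r = 2*s+1 := by omega
        subst hs'
        have h2 : 2*k + (2*s+1) = 2*(k+s)+1 := by ring
        rw [h2, lowg_odd, lowg_odd]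
    · have hk' : e = 2*k+1 := by omega
      subst hk'
      rw [lowg_odd] at hrl
      omega

theorem mdrop_mono : ∀ e : Nat, 0 < e → ∀ j : Nat, e ≤ j → j - lowg j < e →
    j - lowg j ≤ e - lowg e := by
  intro e
  induction e using Nat.strong_induction_on with
  | _ e ih =>
    intro he j hej hje
    rcases Nat.even_or_odd e with ⟨k, hk⟩ | ⟨k, hk⟩
    · have hk' : e = 2*k := by omega
      subst hk'
      have hkpos : 0 < k := by omega
      rcases Nat.even_or_odd j with ⟨g, hg⟩ | ⟨g, hg⟩
      · have hg' : j = 2*g := by omega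
        subst hg'
        have hgpos : 0 < g := by omega
        rw [lowg_even g hgpos] at hje ⊢
        rw [lowg_even k hkpos]
        have hlg := lowg_le g
        have hlk := lowg_le k
        have := ih k (by omega) hkpos g (by omega) (by omega)
        omega
      · have hg' : j = 2*g+1 := by omega
        subst hg'
        rw [lowg_odd] at hje
        omega
    · have hk' : e = 2*k+1 := by omega
      subst hk'
      rw [lowg_odd]
      omega

theorem chain_iff (e : Nat) (he : 0 < e) (j : Nat) :
    (e ≤ j ∧ j - lowg j < e) ↔ (j = e ∨ ((e + lowg e) ≤ j ∧ j - lowg j < e + lowg e)) := by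
  constructor
  · rintro ⟨h1, h2⟩
    by_cases hje : j = e
    · exact Or.inl hje
    · right
      refine ⟨?_, by have := lowg_pos e he; omega⟩
      by_contra hlt
      obtain ⟨r, hr0, hrlt, hjr⟩ : ∃ r, 0 < r ∧ r < lowg e ∧ j = e + r :=
        ⟨j - e, by omega, by omega, by omega⟩
      have hlj : lowg j = lowg r := by
        rw [hjr]; exact lowg_add_small e he r hr0 hrlt
      have := lowg_le r
      omega
  · rintro (hje | ⟨h1, h2⟩)
    · subst hje
      exact ⟨le_refl _, by have := lowg_pos j he; have := lowg_le j; omega⟩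
    · have he' : 0 < e + lowg e := by omega
      have hk1 := mdrop_mono (e + lowg e) he' j h1 h2
      have hk3 := lowg_step e he
      have := lowg_pos e he
      have := lowg_le e
      omega

-- getD after set
theorem getD_set (l : List Int) (i : Nat) (v : Int) (j : Nat) :
    (l.set i v).getD j 0 = if i = j ∧ i < l.length then v else l.getD j 0 := by
  by_cases hij : i = j
  · subst hij
    by_cases hlen : i < l.length
    · rw [if_pos ⟨rfl, hlen⟩]
      simp [List.getD_eq_getElem?_getD, List.getElem?_set_self hlen]
    · rw [if_neg (by tauto), List.set_eq_of_length_le (by omega)]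
  · rw [if_neg (by tauto)]
    simp [List.getD_eq_getElem?_getD, List.getElem?_set_ne hij]

-- effect of one Fenwick update on every tree slot
theorem fenUpdateGo_spec : ∀ (fuel : Nat) (N : Int) (tree : List Int) (e : Nat),
    0 < e → (N + 1 - (e : Int)).toNat ≤ fuel → (N + 1).toNat ≤ tree.length →
    (fenUpdateGo N fuel tree (e : Int)).length = tree.length ∧
    ∀ j : Nat, (fenUpdateGo N fuel tree (e : Int)).getD j 0 =
      tree.getD j 0 + (if e ≤ j ∧ (j : Int) ≤ N ∧ j - lowg j < e then 1 else 0) := by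
  intro fuel
  induction fuel with
  | zero =>
    intro N tree e he hfuel hlen
    refine ⟨rfl, fun j => ?_⟩
    have : ¬ (e ≤ j ∧ (j : Int) ≤ N ∧ j - lowg j < e) := by omega
    simp [fenUpdateGo, this]
  | succ fuel ih =>
    intro N tree e he hfuel hlen
    by_cases hN : (e : Int) ≤ N
    · have hband : PySem.Int.band (e : Int) (-(e : Int)) = ((lowg e : Nat) : Int) :=
        band_neg_self e he
      have hcast : (e : Int) + ((lowg e : Nat) : Int) = ((e + lowg e : Nat) : Int) := by push_cast; ring
      have htn : ((e : Int)).toNat = e := by omega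
      simp only [fenUpdateGo, hN, if_pos, hband, hcast, htn]
      set tree' := tree.set e (tree.getD e 0 + 1) with htree'
      have hlen' : tree'.length = tree.length := by simp [htree']
      have hlp := lowg_pos e he
      have hih := ih N tree' (e + lowg e) (by omega)
        (by push_cast; omega) (by omega)
      refine ⟨by rw [hih.1, hlen'], fun j => ?_⟩
      rw [hih.2 j, htree', getD_set]
      have hel : e < tree.length := by omega
      have hch := chain_iff e he j
      by_cases hj : e ≤ j ∧ (j : Int) ≤ N ∧ j - lowg j < e
      · rw [if_pos hj]
        rcases hch.mp ⟨hj.1, hj.2.2⟩ with hje | hc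
        · have hnc : ¬ (e + lowg e ≤ j ∧ (j : Int) ≤ N ∧ j - lowg j < e + lowg e) := by
            have := lowg_pos e he; omega
          rw [if_pos ⟨hje.symm, hel⟩, if_neg hnc, hje]
          ring
        · have hne : ¬ (e = j ∧ e < tree.length) := by
            rintro ⟨hej, _⟩
            have := lowg_pos e he
            omega
          rw [if_neg hne, if_pos ⟨hc.1, hj.2.1, hc.2⟩]
          try ring
      · rw [if_neg hj]
        have hnc : ¬ (e + lowg e ≤ j ∧ (j : Int) ≤ N ∧ j - lowg j < e + lowg e) := by
          rintro ⟨c1, c2, c3⟩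
          exact hj ⟨(hch.mpr (Or.inr ⟨c1, c3⟩)).1, c2, (hch.mpr (Or.inr ⟨c1, c3⟩)).2⟩
        have hne : ¬ (e = j ∧ e < tree.length) := by
          rintro ⟨hej, _⟩
          subst hej
          exact hj ⟨le_refl _, hN, by have := lowg_pos e he; omega⟩
        rw [if_neg hne, if_neg hnc]
        try ring
    · have : ¬ ((e : Int) ≤ N) := hN
      refine ⟨by simp [fenUpdateGo, this], fun j => ?_⟩
      have hno : ¬ (e ≤ j ∧ (j : Int) ≤ N ∧ j - lowg j < e) := by
        rintro ⟨c1, c2, _⟩; omega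
      simp [fenUpdateGo, this, hno]

-- split a count over a disjoint cover of predicates
theorem countP_split (bag : List Int) (p q r : Int → Bool)
    (h : ∀ v, ((r v = true) ↔ (p v = true ∨ q v = true)) ∧ ¬(p v = true ∧ q v = true)) :
    bag.countP p + bag.countP q = bag.countP r := by
  induction bag with
  | nil => simp
  | cons v bag ih =>
    simp only [List.countP_cons]
    have h1 := (h v).1
    have h2 := (h v).2
    cases hp : p v <;> cases hq : q v <;> cases hr : r v <;> simp_all <;> omega

-- a query returns the number of recorded endpoints ≤ x
theorem fenQueryGo_spec : ∀ (x : Nat) (fuel : Nat) (tree : List Int) (bag : List Int),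
    x ≤ fuel →
    (∀ j : Nat, 0 < j → j ≤ x → tree.getD j 0 =
      ((bag.countP (fun v => decide ((((j - lowg j : Nat)) : Int) < v ∧ v ≤ (j : Int)))) : Int)) →
    fenQueryGo tree fuel (x : Int) =
      ((bag.countP (fun v => decide (0 < v ∧ v ≤ (x : Int)))) : Int) := by
  intro x
  induction x using Nat.strong_induction_on with
  | _ x ihx =>
    intro fuel tree bag hfuel hT
    by_cases hx : 0 < x
    · obtain ⟨f, rfl⟩ : ∃ f, fuel = f + 1 := ⟨fuel - 1, by omega⟩
      have hpos : (0 : Int) < (x : Int) := by omega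
      have hband : PySem.Int.band (x : Int) (-(x : Int)) = ((lowg x : Nat) : Int) :=
        band_neg_self x hx
      have hlp := lowg_pos x hx
      have hll := lowg_le x
      have hcast : (x : Int) - ((lowg x : Nat) : Int) = ((x - lowg x : Nat) : Int) := by
        push_cast; omega
      have htn : ((x : Int)).toNat = x := by omega
      simp only [fenQueryGo, hpos, if_pos, hband, hcast, htn]
      rw [ihx (x - lowg x) (by omega) f tree bag (by omega)
        (fun j hj hjx => hT j hj (by omega))]
      rw [hT x hx (le_refl x)]
      have hsplit := countP_split bag
        (fun v => decide (0 < v ∧ v ≤ ((x - lowg x : Nat) : Int)))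
        (fun v => decide ((((x - lowg x : Nat)) : Int) < v ∧ v ≤ (x : Int)))
        (fun v => decide (0 < v ∧ v ≤ (x : Int)))
        (fun v => ⟨by simp only [decide_eq_true_eq]; omega,
          by simp only [decide_eq_true_eq]; omega⟩)
      push_cast [← hsplit]
      ring
    · have hx0 : x = 0 := by omega
      subst hx0
      have hcnt : (bag.countP (fun v => decide (0 < v ∧ v ≤ (((0 : Nat)) : Int)))) = 0 := by
        apply List.countP_eq_zero.mpr
        intro v _
        simp only [decide_eq_true_eq, not_and]
        intro hv
        omega
      cases fuel with
      | zero =>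
        rw [show fenQueryGo tree 0 (((0 : Nat)) : Int) = 0 from rfl, hcnt]
        rfl
      | succ f =>
        rw [show fenQueryGo tree (f + 1) (((0 : Nat)) : Int) = 0 from by norm_num [fenQueryGo], hcnt]
        rfl

-- tree invariant: slot j holds the number of recorded endpoints in (j - lowbit j, j]
def TreeInv (N : Int) (bag : List Int) (tree : List Int) : Prop :=
  tree.length = (N + 1).toNat ∧
  ∀ j : Nat, 0 < j → (j : Int) ≤ N → tree.getD j 0 =
    ((bag.countP (fun v => decide ((((j - lowg j : Nat)) : Int) < v ∧ v ≤ (j : Int)))) : Int)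

theorem TreeInv_nil (N : Int) : TreeInv N [] (List.replicate (N + 1).toNat 0) := by
  refine ⟨by simp, fun j hj hjN => ?_⟩
  have hlt : j < (N + 1).toNat := by omega
  rw [List.getD_eq_getElem?_getD, List.getElem?_replicate, if_pos hlt]
  simp

theorem TreeInv_update (N : Int) (bag : List Int) (tree : List Int) (b : Int)
    (h : TreeInv N bag tree) (hb1 : 1 ≤ b) (hbN : b ≤ N + 1) :
    TreeInv N (bag ++ [b]) (fenUpdate N tree b) := by
  obtain ⟨hlen, hinv⟩ := h
  obtain ⟨E, rfl⟩ : ∃ E : Nat, b = (E : Int) := ⟨b.toNat, by omega⟩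
  have hspec := fenUpdateGo_spec (N + 1 - (E : Int)).toNat N tree E (by omega) (le_refl _)
    (by omega)
  constructor
  · rw [fenUpdate, hspec.1, hlen]
  · intro j hj hjN
    rw [fenUpdate, hspec.2 j, hinv j hj hjN, List.countP_append]
    have hsing : List.countP
        (fun v => decide ((((j - lowg j : Nat)) : Int) < v ∧ v ≤ (j : Int))) [(E : Int)] =
        if ((((j - lowg j : Nat)) : Int) < (E : Int) ∧ (E : Int) ≤ (j : Int)) then 1 else 0 := by
      by_cases hc : (((j - lowg j : Nat)) : Int) < (E : Int) ∧ (E : Int) ≤ (j : Int)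
      · simp [List.countP_cons, hc]
      · simp [List.countP_cons, hc]
    rw [hsing]
    by_cases hc : (((j - lowg j : Nat)) : Int) < (E : Int) ∧ (E : Int) ≤ (j : Int)
    · rw [if_pos hc, if_pos (by omega)]
      push_cast
      ring
    · rw [if_neg hc, if_neg (by omega)]
      push_cast
      ring

theorem TreeInv_batch (N : Int) : ∀ (L : List (Int × Int)) (bag : List Int) (tree : List Int),
    TreeInv N bag tree → (∀ p ∈ L, 1 ≤ p.2 ∧ p.2 ≤ N + 1) →
    TreeInv N (bag ++ L.map Prod.snd) (L.foldl (fun t p => fenUpdate N t p.2) tree) := by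
  intro L
  induction L with
  | nil => intro bag tree h _; simpa using h
  | cons p L ih =>
    intro bag tree h hL
    have h1 := TreeInv_update N bag tree p.2 h (hL p List.mem_cons_self).1
      (hL p List.mem_cons_self).2
    have h2 := ih (bag ++ [p.2]) (fenUpdate N tree p.2) h1
      (fun q hq => hL q (List.mem_cons_of_mem _ hq))
    simpa [List.append_assoc] using h2

theorem fenQuery_count (N : Int) (bag : List Int) (tree : List Int) (x : Int)
    (h : TreeInv N bag tree) (hbag : ∀ v ∈ bag, 1 ≤ v) (hxN : x ≤ N) :
    fenQuery tree x = ((bag.countP (fun v => decide (v ≤ x))) : Int) := by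
  by_cases hx0 : 0 ≤ x
  · obtain ⟨X, rfl⟩ : ∃ X : Nat, x = (X : Int) := ⟨x.toNat, by omega⟩
    rw [fenQuery, show (((X : Nat)) : Int).toNat = X from by omega]
    rw [fenQueryGo_spec X X tree bag (le_refl _) (fun j hj hjX => h.2 j hj (by omega))]
    congr 1
    apply List.countP_congr
    intro v hv
    have h1 := hbag v hv
    simp only [decide_eq_true_eq]
    omega
  · have hzero : (bag.countP (fun v => decide (v ≤ x))) = 0 := by
      apply List.countP_eq_zero.mpr
      intro v hv
      have := hbag v hv
      simp only [decide_eq_true_eq]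
      omega
    rw [fenQuery, show x.toNat = 0 from by omega]
    simp [fenQueryGo, hzero]

-- ========== B-side counting machinery ==========

def condB (p q : Int × Int) : Bool := decide (p.1 < q.1 ∧ q.1 < p.2 ∧ p.2 < q.2)

def crossCnt (P s : List (Int × Int)) : Int :=
  (s.map (fun q => ((P.countP (fun p => condB p q)) : Int))).sum

def crossRows (X Y : List (Int × Int)) : Int :=
  (X.map (fun p => ((Y.countP (fun q => condB p q)) : Int))).sum

theorem brutePairs_append : ∀ X Y : List (Int × Int),
    brutePairs (X ++ Y) = brutePairs X + crossRows X Y + brutePairs Y := by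
  intro X Y
  induction X with
  | nil => simp [brutePairs, crossRows]
  | cons p X ih =>
    simp only [List.cons_append, brutePairs, ih, crossRows, List.map_cons, List.sum_cons,
      List.countP_append, condB]
    push_cast
    ring

theorem crossCnt_zero_left (s : List (Int × Int)) : crossCnt [] s = 0 := by
  unfold crossCnt
  induction s with
  | nil => simp
  | cons q s ih => simpa using ih

theorem crossRows_eq_crossCnt : ∀ X Y : List (Int × Int), crossRows X Y = crossCnt X Y := by
  intro X Y
  induction X with
  | nil => simp [crossRows, crossCnt_zero_left]
  | cons p X ih =>
    simp only [crossRows, List.map_cons, List.sum_cons] at ih ⊢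
    rw [ih]
    unfold crossCnt
    have hcnt : ∀ q ∈ Y, (((p :: X).countP (fun r => condB r q)) : Int) =
        ((X.countP (fun r => condB r q)) : Int) + (if condB p q then (1 : Int) else 0) := by
      intro q _
      rw [List.countP_cons]
      split_ifs <;> push_cast <;> ring
    rw [List.map_congr_left hcnt,
      PySem.List.sum_map_add_int Y (fun q => ((X.countP (fun r => condB r q)) : Int))
        (fun q => if condB p q then (1 : Int) else 0),
      PySem.List.sum_map_ite_one_zero (fun q => condB p q) Y]
    ring

theorem crossCnt_append_right (P B R : List (Int × Int)) :
    crossCnt P (B ++ R) = crossCnt P B + crossCnt P R := by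
  simp [crossCnt]

theorem crossCnt_append_left (P B R : List (Int × Int)) :
    crossCnt (P ++ B) R = crossCnt P R + crossCnt B R := by
  unfold crossCnt
  have hcnt : ∀ q ∈ R, (((P ++ B).countP (fun p => condB p q)) : Int) =
      ((P.countP (fun p => condB p q)) : Int) + ((B.countP (fun p => condB p q)) : Int) := by
    intro q _
    rw [List.countP_append]
    push_cast
    ring
  rw [List.map_congr_left hcnt,
    PySem.List.sum_map_add_int R (fun q => ((P.countP (fun p => condB p q)) : Int))
      (fun q => ((B.countP (fun p => condB p q)) : Int))]

theorem brutePairs_const_left (a : Int) : ∀ B : List (Int × Int),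
    (∀ q ∈ B, q.1 = a) → brutePairs B = 0 := by
  intro B
  induction B with
  | nil => intro _; rfl
  | cons p B ih =>
    intro h
    have hcnt : B.countP (fun q => decide (p.1 < q.1 ∧ q.1 < p.2 ∧ p.2 < q.2)) = 0 := by
      apply List.countP_eq_zero.mpr
      rintro ⟨x, y⟩ hq
      have h1 : p.1 = a := h p List.mem_cons_self
      have h2 : x = a := by simpa using h (x, y) (List.mem_cons_of_mem _ hq)
      simp only [decide_eq_true_eq]
      omega
    rw [show brutePairs (p :: B) =
        ((B.countP (fun q => decide (p.1 < q.1 ∧ q.1 < p.2 ∧ p.2 < q.2)) : Nat) : Int) +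
          brutePairs B from rfl,
      hcnt, ih (fun q hq => h q (List.mem_cons_of_mem _ hq))]
    simp

theorem dropWhile_head_false {α : Type} (p : α → Bool) :
    ∀ (l : List α) (h : α) (t : List α), l.dropWhile p = h :: t → p h = false := by
  intro l
  induction l with
  | nil => intro h t hyp; simp [List.dropWhile] at hyp
  | cons x l ih =>
    intro h t hyp
    rw [List.dropWhile_cons] at hyp
    split at hyp
    · exact ih h t hyp
    · cases hyp
      simp_all

-- one unfolding of the outer sweep loop
theorem sweep_cons (N a b : Int) (rest : List (Int × Int)) (tree : List Int) (acc : Int) :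
    sweep N ((a, b) :: rest) tree acc =
      sweep N (rest.dropWhile (fun p => p.1 == a))
        (((a, b) :: rest.takeWhile (fun p => p.1 == a)).foldl (fun t p => fenUpdate N t p.2) tree)
        (((a, b) :: rest.takeWhile (fun p => p.1 == a)).foldl
          (fun s p => s + (fenQuery tree (p.2 - 1) - fenQuery tree p.1)) acc) := by
  rw [sweep]

-- ========== the main sweep invariant ==========

theorem sweep_spec : ∀ (n : Nat) (s P : List (Int × Int)) (N : Int) (tree : List Int) (acc : Int),
    s.length ≤ n →
    (∀ q ∈ s, q.1 < q.2 ∧ 1 ≤ q.2 ∧ q.2 ≤ N + 1) →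
    (∀ p ∈ P, p.1 < p.2 ∧ 1 ≤ p.2 ∧ p.2 ≤ N + 1) →
    s.Pairwise (fun p q => p.1 ≤ q.1) →
    (∀ p ∈ P, ∀ q ∈ s, p.1 < q.1) →
    TreeInv N (P.map Prod.snd) tree →
    sweep N s tree acc = acc + crossCnt P s + brutePairs s := by
  intro n
  induction n with
  | zero =>
    intro s P N tree acc hn _ _ _ _ _
    have hs0 : s = [] := by
      cases s with
      | nil => rfl
      | cons _ _ => simp at hn
    subst hs0
    simp [sweep, crossCnt, brutePairs]
  | succ n ih =>
    intro s P N tree acc hn hs hP hsort hcross hT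
    cases s with
    | nil => simp [sweep, crossCnt, brutePairs]
    | cons hd rest =>
      obtain ⟨a, b⟩ := hd
      set T := rest.takeWhile (fun p => p.1 == a) with hTdef
      set R := rest.dropWhile (fun p => p.1 == a) with hRdef
      set batch := (a, b) :: T with hbatchdef
      have hrestTR : rest = T ++ R := by rw [hTdef, hRdef, List.takeWhile_append_dropWhile]
      have hsTR : (a, b) :: rest = batch ++ R := by
        rw [hbatchdef, List.cons_append, ← hrestTR]
      have hbatch_mem : ∀ q ∈ batch, q ∈ (a, b) :: rest := by
        intro q hq
        rcases List.mem_cons.mp hq with rfl | hq'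
        · exact List.mem_cons_self
        · exact List.mem_cons_of_mem _ (List.Sublist.mem hq' (by rw [hTdef] at hq' ⊢; exact List.takeWhile_sublist _))
      have hbatch_fst : ∀ q ∈ batch, q.1 = a := by
        intro q hq
        rcases List.mem_cons.mp hq with rfl | hq'
        · rfl
        · have := List.mem_takeWhile_imp (by rw [hTdef] at hq'; exact hq')
          simpa using this
      have hR_mem : ∀ q ∈ R, q ∈ rest := by
        intro q hq
        exact List.Sublist.mem hq (by rw [hRdef]; exact List.dropWhile_sublist _)
      have hrest_pairwise : rest.Pairwise (fun p q => p.1 ≤ q.1) := (List.pairwise_cons.mp hsort).2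
      have hR_pairwise : R.Pairwise (fun p q => p.1 ≤ q.1) :=
        List.Pairwise.sublist (by rw [hRdef]; exact List.dropWhile_sublist _) hrest_pairwise
      have hR_gt : ∀ q ∈ R, a < q.1 := by
        intro q hq
        obtain ⟨h, t, hR'⟩ : ∃ h t, R = h :: t := by
          cases hRc : R with
          | nil => rw [hRc] at hq; simp at hq
          | cons h t => exact ⟨h, t, rfl⟩
        have hdw : List.dropWhile (fun p : Int × Int => p.1 == a) rest = h :: t := by
          rw [← hRdef]; exact hR'
        have hhead : (fun p : Int × Int => p.1 == a) h = false :=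
          dropWhile_head_false _ rest h t hdw
        have hha : h.1 ≠ a := by simpa using hhead
        have hhmem : h ∈ rest := hR_mem h (by rw [hR']; exact List.mem_cons_self)
        have hhge : a ≤ h.1 := by
          have := (List.pairwise_cons.mp hsort).1 h hhmem
          simpa using this
        have hhgt : a < h.1 := lt_of_le_of_ne hhge (Ne.symm hha)
        rw [hR'] at hq
        rcases List.mem_cons.mp hq with rfl | hq'
        · exact hhgt
        · have hpair : (h :: t).Pairwise (fun p q => p.1 ≤ q.1) := by
            rw [← hR']; exact hR_pairwise
          have := (List.pairwise_cons.mp hpair).1 q hq'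
          omega
      -- bounds
      have hbatch_bounds : ∀ q ∈ batch, q.1 < q.2 ∧ 1 ≤ q.2 ∧ q.2 ≤ N + 1 :=
        fun q hq => hs q (hbatch_mem q hq)
      have hR_bounds : ∀ q ∈ R, q.1 < q.2 ∧ 1 ≤ q.2 ∧ q.2 ≤ N + 1 :=
        fun q hq => hs q (List.mem_cons_of_mem _ (hR_mem q hq))
      have hP'_bounds : ∀ p ∈ P ++ batch, p.1 < p.2 ∧ 1 ≤ p.2 ∧ p.2 ≤ N + 1 := by
        intro p hp
        rcases List.mem_append.mp hp with hp' | hp'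
        · exact hP p hp'
        · exact hbatch_bounds p hp'
      have hcross' : ∀ p ∈ P ++ batch, ∀ q ∈ R, p.1 < q.1 := by
        intro p hp q hq
        rcases List.mem_append.mp hp with hp' | hp'
        · exact hcross p hp' q (List.mem_cons_of_mem _ (hR_mem q hq))
        · rw [hbatch_fst p hp']
          exact hR_gt q hq
      -- the new tree
      have hT' : TreeInv N ((P ++ batch).map Prod.snd)
          (batch.foldl (fun t p => fenUpdate N t p.2) tree) := by
        have := TreeInv_batch N batch (P.map Prod.snd) tree hT
          (fun p hp => ⟨(hbatch_bounds p hp).2.1, (hbatch_bounds p hp).2.2⟩)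
        simpa [List.map_append] using this
      -- the query contributions over the batch
      have hbag1 : ∀ v ∈ P.map Prod.snd, 1 ≤ v := by
        intro v hv
        obtain ⟨p, hp, rfl⟩ := List.mem_map.mp hv
        have := hP p hp
        omega
      have hquery : ∀ q ∈ batch,
          fenQuery tree (q.2 - 1) - fenQuery tree q.1 =
            ((P.countP (fun p => condB p q)) : Int) := by
        intro q hq
        have hqb := hbatch_bounds q hq
        have hq1 := fenQuery_count N (P.map Prod.snd) tree (q.2 - 1) hT hbag1 (by omega)
        have hq2 := fenQuery_count N (P.map Prod.snd) tree q.1 hT hbag1 (by omega)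
        rw [hq1, hq2]
        have hsplit := countP_split (P.map Prod.snd)
          (fun v => decide (v ≤ q.1))
          (fun v => decide (q.1 < v ∧ v ≤ q.2 - 1))
          (fun v => decide (v ≤ q.2 - 1))
          (fun v => ⟨by simp only [decide_eq_true_eq]; omega,
            by simp only [decide_eq_true_eq]; omega⟩)
        have hmid : ((P.map Prod.snd).countP (fun v => decide (q.1 < v ∧ v ≤ q.2 - 1)) : Int) =
            ((P.countP (fun p => condB p q)) : Int) := by
          rw [List.countP_map]
          simp only [Function.comp_def]
          have hiff : ∀ p ∈ P, (decide (q.1 < p.2 ∧ p.2 ≤ q.2 - 1)) = true ↔ condB p q = true := by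
            intro p hp
            have hpa : p.1 < a := by
              simpa using hcross p hp (a, b) List.mem_cons_self
            have hqa : q.1 = a := hbatch_fst q hq
            simp only [condB, decide_eq_true_eq]
            constructor
            · rintro ⟨h1, h2⟩
              exact ⟨by omega, by omega, by omega⟩
            · rintro ⟨h1, h2, h3⟩
              exact ⟨by omega, by omega⟩
          rw [List.countP_congr (fun p hp => hiff p hp)]
        rw [← hmid]
        omega
      have hacc' : batch.foldl (fun s p => s + (fenQuery tree (p.2 - 1) - fenQuery tree p.1)) acc =
          acc + crossCnt P batch := by
        rw [PySem.List.foldl_add batch (fun p => fenQuery tree (p.2 - 1) - fenQuery tree p.1) acc]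
        unfold crossCnt
        rw [List.map_congr_left (fun q hq => hquery q hq)]
      rw [sweep_cons, ← hTdef, ← hRdef, ← hbatchdef, hacc']
      have hRlen : R.length ≤ n := by
        have h1 := List.length_dropWhile_le (fun p : Int × Int => p.1 == a) rest
        rw [← hRdef] at h1
        simp only [List.length_cons] at hn
        omega
      rw [ih R (P ++ batch) N _ _ hRlen hR_bounds hP'_bounds hR_pairwise hcross' hT']
      rw [hsTR, crossCnt_append_right, brutePairs_append, crossCnt_append_left,
        crossRows_eq_crossCnt, brutePairs_const_left a batch hbatch_fst]
      ring

-- ========== sortedness of sorted2 ==========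

def bfr (p q : Int × Int) : Bool :=
  decide (p.1 < q.1) || (!decide (q.1 < p.1) && decide (p.2 < q.2))

theorem bfr_asym (p q : Int × Int) (h : bfr p q = true) : bfr q p = false := by
  refine Bool.eq_false_iff.mpr (fun hqp => ?_)
  unfold bfr at h hqp
  simp only [Bool.or_eq_true, Bool.and_eq_true, Bool.not_eq_true', decide_eq_true_eq,
    decide_eq_false_iff_not] at h hqp
  omega

theorem bfr_trans (p q r : Int × Int) (h1 : bfr p q = true) (h2 : bfr q r = true) :
    bfr p r = true := by
  unfold bfr at h1 h2 ⊢
  simp only [Bool.or_eq_true, Bool.and_eq_true, Bool.not_eq_true', decide_eq_true_eq,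
    decide_eq_false_iff_not] at h1 h2 ⊢
  omega

theorem pairwise_insertBy (x : Int × Int) : ∀ ys : List (Int × Int),
    ys.Pairwise (fun p q => bfr q p = false) →
    (PySem.List.insertBy bfr x ys).Pairwise (fun p q => bfr q p = false) := by
  intro ys
  induction ys with
  | nil => intro _; simp [PySem.List.insertBy]
  | cons y ys ih =>
    intro hp
    rw [PySem.List.insertBy]
    split_ifs with hxy
    · refine List.pairwise_cons.mpr ⟨?_, hp⟩
      intro z hz
      rcases List.mem_cons.mp hz with rfl | hz'
      · exact bfr_asym x z hxy
      · have hyz := (List.pairwise_cons.mp hp).1 z hz'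
        refine Bool.eq_false_iff.mpr (fun hzx => ?_)
        have := bfr_trans z x y hzx hxy
        rw [this] at hyz
        simp at hyz
    · refine List.pairwise_cons.mpr ⟨?_, ih (List.pairwise_cons.mp hp).2⟩
      intro z hz
      rcases (PySem.List.mem_insertBy bfr x z ys).mp hz with rfl | hz'
      · exact Bool.eq_false_iff.mpr hxy
      · exact (List.pairwise_cons.mp hp).1 z hz'

theorem pairwise_sorted2 (xs : List (Int × Int)) :
    (PySem.List.sorted2 xs Prod.fst Prod.snd).Pairwise (fun p q => p.1 ≤ q.1) := by
  have hfold : PySem.List.sorted2 xs Prod.fst Prod.snd =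
      xs.foldl (fun acc x => PySem.List.insertBy bfr x acc) [] := rfl
  rw [hfold]
  have key : ∀ (l : List (Int × Int)) (acc : List (Int × Int)),
      acc.Pairwise (fun p q => bfr q p = false) →
      (l.foldl (fun acc x => PySem.List.insertBy bfr x acc) acc).Pairwise
        (fun p q => bfr q p = false) := by
    intro l
    induction l with
    | nil => intro acc h; simpa using h
    | cons x l ih =>
      intro acc h
      exact ih _ (pairwise_insertBy x acc h)
  have hkey := key xs [] (by simp)
  apply hkey.imp
  intro p q h
  unfold bfr at h
  simp only [Bool.or_eq_false_iff, Bool.and_eq_false_iff, Bool.not_eq_false,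
    decide_eq_false_iff_not, decide_eq_true_eq] at h
  omega

-- ===== VERDICT (by name: the statement is the Claim_ definition above) =====
theorem count_chord_intersections_spec : Claim_equal_count_chord_intersections := by
  unfold Claim_equal_count_chord_intersections
  intro chords N _ hpre
  unfold Spec_count_chord_intersections
  unfold count_chord_intersections count_chord_intersections_alt
  by_cases hlen : chords.length ≤ 1
  · simp [hlen]
  · rw [if_neg hlen, if_neg hlen]
    have hpre' : ∀ p ∈ chords, p.1 < p.2 ∧ 1 ≤ p.2 ∧ p.2 ≤ N + 1 := by
      rcases hpre with hl | hb
      · exact absurd hl hlen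
      · exact hb
    have hmem : ∀ q ∈ PySem.List.sorted2 chords Prod.fst Prod.snd, q ∈ chords := by
      intro q hq
      exact (PySem.List.sorted2_perm chords Prod.fst Prod.snd false).mem_iff.mp hq
    have hbounds : ∀ q ∈ PySem.List.sorted2 chords Prod.fst Prod.snd,
        q.1 < q.2 ∧ 1 ≤ q.2 ∧ q.2 ≤ N + 1 :=
      fun q hq => hpre' q (hmem q hq)
    rw [sweep_spec (PySem.List.sorted2 chords Prod.fst Prod.snd).length
      (PySem.List.sorted2 chords Prod.fst Prod.snd) [] N (List.replicate (N + 1).toNat 0) 0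
      (le_refl _) hbounds (by simp) (pairwise_sorted2 chords) (by simp)
      (by simpa using TreeInv_nil N)]
    rw [crossCnt_zero_left]
    ring
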